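-- pv_equiv track=rewrite | github.com/Rampex1/ArtificalIntelligence | a1/p7.py | better_board
-- ===== SOURCE A (Python) =====
-- def better_board(problem):
--     #Your p7 code here
--     queens = problem
--     n = 8
--
--     def total_conflicts(modified_queens):
--         """Calculate total conflicts between queens"""
--         count = 0
--         for i in range(len(modified_queens)):
--             r1, c1 = modified_queens[i]
--             for j in range(i + 1, len(modified_queens)):
--                 r2, c2 = modified_queens[j]
--                 if r1 == r2 or c1 == c2 or abs(r1 - r2) == abs(c1 - c2):
--                     count += 1
--         return count
--
--     def queens_to_board_string(queen_positions):
--         """Convert list of queen positions to 8x8 board string"""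
--         board = [['.' for _ in range(n)] for _ in range(n)]
--         for r, c in queen_positions:
--             board[r][c] = 'q'
--
--         result = []
--         for row in board:
--             result.append(' '.join(row))
--         return '\n'.join(result)
--
--     current_conflicts = total_conflicts(queens)
--     best_conflicts = current_conflicts
--     best_board = queens[:]
--
--     # Try moving each queen to every position in its column
--     for col in range(n):
--         # Find the queen in this column
--         current_queen_row = None
--         for qr, qc in queens:
--             if qc == col:
--                 current_queen_row = qr
--                 break
--
--         if current_queen_row is None:
--             continue
--
--         for new_row in range(n):
--             if new_row == current_queen_row:
--                 continue
--
--             modified_queens = [(qr, qc) for (qr, qc) in queens if qc != col]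
--             modified_queens.append((new_row, col))
--
--             conflicts = total_conflicts(modified_queens)
--
--             if conflicts < best_conflicts:
--                 best_conflicts = conflicts
--                 best_board = modified_queens[:]
--
--     return queens_to_board_string(best_board)
-- ===== SOURCE B (Python) =====
-- def better_board(problem):
--     queens = problem
--     n = 8
--
--     def conflict(p, q):
--         return p[0] == q[0] or p[1] == q[1] or abs(p[0] - q[0]) == abs(p[1] - q[1])
--
--     def cross(p, qs):
--         """conflicts between one position p and every queen in qs"""
--         return sum(1 for q in qs if conflict(p, q))
--
--     def pair_conflicts(qs):
--         """pairwise conflicts, head against tail plus recursion on the tail"""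
--         if not qs:
--             return 0
--         return cross(qs[0], qs[1:]) + pair_conflicts(qs[1:])
--
--     best_conflicts = pair_conflicts(queens)
--     best_board = queens
--
--     for col in range(n):
--         row = next((r for r, c in queens if c == col), None)
--         if row is None:
--             continue
--         rest = [q for q in queens if q[1] != col]
--         base = pair_conflicts(rest)          # computed once per column
--         for new_row in range(n):
--             if new_row == row:
--                 continue
--             conflicts = base + cross((new_row, col), rest)   # incremental, O(m) per move
--             if conflicts < best_conflicts:
--                 best_conflicts = conflicts
--                 best_board = rest + [(new_row, col)]
--
--     board = [['.'] * n for _ in range(n)]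
--     for r, c in best_board:
--         board[r][c] = 'q'
--     return '\n'.join(' '.join(row) for row in board)
-- ===== Notes on version B (the rewrite author's own statement) =====
-- stated objective: faster
-- what changed: B evaluates each candidate move incrementally (one per-column base pairwise count plus an O(m) cross-conflict count for the moved queen, via a head-vs-tail recursion and an append identity) instead of rescanning all queen pairs for every candidate board.
import Mathlib
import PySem

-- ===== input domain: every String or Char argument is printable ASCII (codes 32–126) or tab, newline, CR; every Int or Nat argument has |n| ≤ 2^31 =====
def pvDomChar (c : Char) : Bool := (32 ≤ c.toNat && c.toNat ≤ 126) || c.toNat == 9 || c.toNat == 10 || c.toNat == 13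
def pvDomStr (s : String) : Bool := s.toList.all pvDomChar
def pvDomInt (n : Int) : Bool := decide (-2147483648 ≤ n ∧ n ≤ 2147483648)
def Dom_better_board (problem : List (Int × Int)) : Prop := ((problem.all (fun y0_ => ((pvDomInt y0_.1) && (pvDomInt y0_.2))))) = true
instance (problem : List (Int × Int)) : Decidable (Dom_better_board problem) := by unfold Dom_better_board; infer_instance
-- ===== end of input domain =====

-- B replaces A's full pairwise rescan of every candidate board by an incremental count:
-- a per-column base pairwise count plus the moved queen's cross conflicts.

-- ===== PORT A =====
-- nested helper total_conflicts: double index loop over all pairs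
def pvA_total_conflicts (qs : List (Int × Int)) : Int :=
  (PySem.List.pyRange 0 (qs.length : Int) 1).foldl (fun count i =>
    let p := PySem.List.pyGetD qs i ((0 : Int), (0 : Int))
    (PySem.List.pyRange (i + 1) (qs.length : Int) 1).foldl (fun count j =>
      let q := PySem.List.pyGetD qs j ((0 : Int), (0 : Int))
      if p.1 == q.1 || p.2 == q.2 || ((p.1 - q.1).natAbs == (p.2 - q.2).natAbs) then count + 1
      else count) count) 0

-- board[r][c] = 'q' (Python index semantics via pySetD/pyGetD; exact wherever Python does not raise)
def pvA_place (board : List (List String)) (rc : Int × Int) : List (List String) :=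
  PySem.List.pySetD board rc.1
    (PySem.List.pySetD (PySem.List.pyGetD board rc.1 []) rc.2 "q")

-- nested helper queens_to_board_string
def pvA_board_string (qs : List (Int × Int)) : String :=
  PySem.Str.join "\n"
    ((qs.foldl pvA_place (List.replicate 8 (List.replicate 8 "."))).map
      (fun row => PySem.Str.join " " row))

-- body of the inner 'for new_row in range(n)' loop
def pvA_try (queens : List (Int × Int)) (col cqr : Int)
    (best : Int × List (Int × Int)) (new_row : Int) : Int × List (Int × Int) :=
  if new_row == cqr then best
  else
    let modified := queens.filter (fun q => q.2 != col) ++ [(new_row, col)]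
    let conflicts := pvA_total_conflicts modified
    if conflicts < best.1 then (conflicts, modified) else best

-- body of the outer 'for col in range(n)' loop ('break' on the first queen found = find?)
def pvA_col (queens : List (Int × Int)) (best : Int × List (Int × Int)) (col : Int) :
    Int × List (Int × Int) :=
  match queens.find? (fun q => q.2 == col) with
  | none => best
  | some q0 => (PySem.List.pyRange 0 8 1).foldl (pvA_try queens col q0.1) best

def better_board (problem : List (Int × Int)) : String :=
  let queens := problem
  let best := (pvA_total_conflicts queens, queens)
  let res := (PySem.List.pyRange 0 8 1).foldl (pvA_col queens) best
  pvA_board_string res.2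

-- ===== PORT B =====
def pvB_conflict (p q : Int × Int) : Bool :=
  p.1 == q.1 || p.2 == q.2 || ((p.1 - q.1).natAbs == (p.2 - q.2).natAbs)

-- sum(1 for q in qs if conflict(p, q))
def pvB_cross (p : Int × Int) (qs : List (Int × Int)) : Int :=
  (qs.countP (fun q => pvB_conflict p q) : Int)

-- head-against-tail recursion
def pvB_pair : List (Int × Int) → Int
  | [] => 0
  | p :: rest => pvB_cross p rest + pvB_pair rest

def pvB_col (queens : List (Int × Int)) (best : Int × List (Int × Int)) (col : Int) :
    Int × List (Int × Int) :=
  match queens.find? (fun q => q.2 == col) with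
  | none => best
  | some q0 =>
    let rest := queens.filter (fun q => q.2 != col)
    let base := pvB_pair rest
    (PySem.List.pyRange 0 8 1).foldl (fun best nr =>
      if nr == q0.1 then best
      else
        let conflicts := base + pvB_cross (nr, col) rest
        if conflicts < best.1 then (conflicts, rest ++ [(nr, col)]) else best) best

-- board[r][c] = 'q' (Python index semantics via pySetD/pyGetD; exact wherever Python does not raise)
def pvB_place (board : List (List String)) (rc : Int × Int) : List (List String) :=
  PySem.List.pySetD board rc.1
    (PySem.List.pySetD (PySem.List.pyGetD board rc.1 []) rc.2 "q")

def pvB_board_string (qs : List (Int × Int)) : String :=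
  PySem.Str.join "\n"
    ((qs.foldl pvB_place (List.replicate 8 (List.replicate 8 "."))).map
      (fun row => PySem.Str.join " " row))

def better_board_alt (problem : List (Int × Int)) : String :=
  let queens := problem
  let res := (PySem.List.pyRange 0 8 1).foldl (pvB_col queens) (pvB_pair queens, queens)
  pvB_board_string res.2

-- ===== PRECONDITION & SPEC =====
-- exactly the inputs on which A returns: a coordinate ≥ 8 or < -8 makes A's board
-- assignment raise IndexError (negative coordinates in -8..-1 index the board from the end
-- and A returns normally, so they stay inside Pre_)
def Pre_better_board (problem : List (Int × Int)) : Prop :=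
  ∀ q ∈ problem, -8 ≤ q.1 ∧ q.1 < 8 ∧ -8 ≤ q.2 ∧ q.2 < 8
instance (problem : List (Int × Int)) : Decidable (Pre_better_board problem) := by
  unfold Pre_better_board; infer_instance

def pvWitness_better_board : (List (Int × Int)) :=
  [(0, 0), (1, 1), (2, 2), (3, 3), (4, 4), (5, 5), (6, 6), (7, 7)]

def Spec_better_board (problem : List (Int × Int)) (out : String) : Prop := out = better_board_alt problem
instance (problem : List (Int × Int)) (out : String) : Decidable (Spec_better_board problem out) := by unfold Spec_better_board; infer_instance

-- ===== CLAIM (what is proved, stated in full; the proofs are below) =====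
def Claim_equal_better_board : Prop := ∀ (problem : List (Int × Int)), Dom_better_board problem → Pre_better_board problem → Spec_better_board problem (better_board problem)

-- ===== LEMMAS AND PROOFS =====

lemma pv_beq_symm (a b : Int) : (a == b) = (b == a) := by
  by_cases h : a = b
  · subst h; rfl
  · simp [h, Ne.symm h]

lemma pvB_conflict_symm (p q : Int × Int) : pvB_conflict p q = pvB_conflict q p := by
  unfold pvB_conflict
  have h1 : (p.1 - q.1).natAbs = (q.1 - p.1).natAbs := by omega
  have h2 : (p.2 - q.2).natAbs = (q.2 - p.2).natAbs := by omega
  rw [h1, h2, pv_beq_symm p.1 q.1, pv_beq_symm p.2 q.2]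

-- A's inner index loop counts the cross conflicts of qs[i] against the tail after i
lemma pvA_inner_eq (qs : List (Int × Int)) (p : Int × Int) (i : Nat) (count : Int) :
    (PySem.List.pyRange ((i : Int) + 1) (qs.length : Int) 1).foldl (fun count j =>
      let q := PySem.List.pyGetD qs j ((0 : Int), (0 : Int))
      if p.1 == q.1 || p.2 == q.2 || ((p.1 - q.1).natAbs == (p.2 - q.2).natAbs) then count + 1
      else count) count
    = count + pvB_cross p (qs.drop (i + 1)) := by
  have h : ((i : Int) + 1) = (((i + 1 : Nat) : Int)) := by push_cast; ring
  calc (PySem.List.pyRange ((i : Int) + 1) (qs.length : Int) 1).foldl (fun count j =>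
        let q := PySem.List.pyGetD qs j ((0 : Int), (0 : Int))
        if p.1 == q.1 || p.2 == q.2 || ((p.1 - q.1).natAbs == (p.2 - q.2).natAbs) then count + 1
        else count) count
      = (qs.drop (i + 1)).foldl (fun count q =>
          if pvB_conflict p q then count + 1 else count) count := by
        rw [h]
        exact PySem.List.foldl_pyRange_pyGetD' qs ((0 : Int), (0 : Int))
          (fun count q => if pvB_conflict p q then count + 1 else count) count (by positivity)
    _ = count + pvB_cross p (qs.drop (i + 1)) := by
        rw [PySem.List.foldl_if_add_one]; rfl

-- the outer index loop, summed against pvB_cross of the tails, is pvB_pair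
lemma pv_outer (qs : List (Int × Int)) : ∀ acc : Int,
    (List.range qs.length).foldl (fun c k =>
      c + pvB_cross (qs.getD k ((0 : Int), (0 : Int))) (qs.drop (k + 1))) acc
    = acc + pvB_pair qs := by
  induction qs with
  | nil => intro acc; simp [pvB_pair]
  | cons p tl ih =>
      intro acc
      simp only [List.length_cons, List.range_succ_eq_map, List.foldl_cons, List.foldl_map,
        List.getD_cons_zero, List.drop_succ_cons, List.drop_zero, List.getD_cons_succ]
      rw [ih (acc + pvB_cross p tl)]
      simp only [pvB_pair]
      ring

-- A's double loop equals B's structural pairwise count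
lemma pvA_total_eq (qs : List (Int × Int)) : pvA_total_conflicts qs = pvB_pair qs := by
  unfold pvA_total_conflicts
  rw [PySem.List.pyRange_one]
  have hlen : (((qs.length : Int)) - 0).toNat = qs.length := by omega
  rw [hlen, List.foldl_map]
  have hcongr : ∀ (acc : Int) (k : Nat), k ∈ List.range qs.length →
      (fun (count : Int) (i : Int) =>
        let p := PySem.List.pyGetD qs i ((0 : Int), (0 : Int))
        (PySem.List.pyRange (i + 1) (qs.length : Int) 1).foldl (fun count j =>
          let q := PySem.List.pyGetD qs j ((0 : Int), (0 : Int))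
          if p.1 == q.1 || p.2 == q.2 || ((p.1 - q.1).natAbs == (p.2 - q.2).natAbs) then count + 1
          else count) count) acc ((0 : Int) + (k : Int))
      = acc + pvB_cross (qs.getD k ((0 : Int), (0 : Int))) (qs.drop (k + 1)) := by
    intro acc k _
    have h0 : (0 : Int) + (k : Int) = (k : Int) := by ring
    simp only [h0, PySem.List.pyGetD_natCast]
    exact pvA_inner_eq qs (qs.getD k ((0 : Int), (0 : Int))) k acc
  rw [PySem.List.foldl_congr_mem (List.range qs.length) _ _ 0 hcongr, pv_outer qs 0]
  ring

-- appending one queen adds exactly its cross conflicts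
lemma pvB_pair_append (xs : List (Int × Int)) (p : Int × Int) :
    pvB_pair (xs ++ [p]) = pvB_pair xs + pvB_cross p xs := by
  induction xs with
  | nil => simp [pvB_pair, pvB_cross]
  | cons x xs ih =>
      simp only [List.cons_append, pvB_pair, ih, pvB_cross, List.countP_append,
        List.countP_cons, List.countP_nil, pvB_conflict_symm x p]
      push_cast
      ring

lemma pv_col_eq (queens : List (Int × Int)) (best : Int × List (Int × Int)) (col : Int) :
    pvA_col queens best col = pvB_col queens best col := by
  unfold pvA_col pvB_col
  cases hf : queens.find? (fun q => q.2 == col) with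
  | none => rfl
  | some q0 =>
      simp only []
      apply PySem.List.foldl_congr_mem
      intro acc nr _
      unfold pvA_try
      by_cases h : nr == q0.1
      · simp [h]
      · simp only [h, if_false, Bool.false_eq_true, pvA_total_eq, pvB_pair_append]

-- ===== VERDICT (by name: the statement is the Claim_ definition above) =====
theorem better_board_spec : Claim_equal_better_board := by
  intro problem _ _
  unfold Spec_better_board better_board better_board_alt
  have hres : (PySem.List.pyRange 0 8 1).foldl (pvA_col problem) (pvA_total_conflicts problem, problem)
      = (PySem.List.pyRange 0 8 1).foldl (pvB_col problem) (pvB_pair problem, problem) := by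
    rw [pvA_total_eq]
    apply PySem.List.foldl_congr_mem
    intro acc col _
    exact pv_col_eq problem acc col
  show pvA_board_string ((PySem.List.pyRange 0 8 1).foldl (pvA_col problem)
      (pvA_total_conflicts problem, problem)).2
    = pvB_board_string ((PySem.List.pyRange 0 8 1).foldl (pvB_col problem)
      (pvB_pair problem, problem)).2
  rw [hres]
  rfl
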